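-- pv_equiv track=rewrite | github.com/amplab/ray | examples/wordcount/wordcount.py | split_into_partitions
-- ===== SOURCE A (Python) =====
-- def split_into_partitions(sizes, num_partitions):
--   total_size = sum(sizes)
--   partition_size = (total_size + num_partitions - 1) // num_partitions
--   perm = sorted(range(len(sizes)), key=lambda k: sizes[k])
--   head, tail = perm, []
--   result = [[] for i in range(num_partitions-1)]
--   # first assign the first num_partitions - 1 partitions
--   for partition in range(len(result)):
--     cur_size = 0
--     while len(head) > 0:
--       elem = head.pop()
--       if sizes[elem] <= partition_size - cur_size:
--         result[partition].append(elem)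
--         cur_size += sizes[elem]
--       else:
--         tail.append(elem)
--     head, tail = list(reversed(tail)), []
--   # then assign the last partition
--   result.append(head)
--   return result
-- ===== SOURCE B (Python) =====
-- def split_into_partitions(sizes, num_partitions):
--   # single first-fit-decreasing pass over all elements (running fill per bin),
--   # instead of A's per-partition sweeps with head/tail list rebuilding
--   total = sum(sizes)
--   psize = (total + num_partitions - 1) // num_partitions
--   order = list(reversed(sorted(range(len(sizes)), key=lambda k: sizes[k])))
--   k = max(num_partitions - 1, 0)
--   fills = [0] * k
--   parts = [[] for _ in range(k)]
--   rej = []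
--   for e in order:
--     s = sizes[e]
--     for p in range(k):
--       if fills[p] + s <= psize:
--         fills[p] += s
--         parts[p].append(e)
--         break
--     else:
--       rej.append(e)
--   rej.reverse()
--   parts.append(rej)
--   return parts
-- ===== Notes on version B (the rewrite author's own statement) =====
-- stated objective: alternative
-- what changed: A fills one partition at a time, each pass popping through the whole remaining head list and rebuilding it from the tail; B makes a single first-fit-decreasing pass over the elements with a running fill per bin, so the repeated head/tail list rebuilding disappears.
-- outside the precondition, e.g. on split_into_partitions([1, 2, 3], 0): A raises ZeroDivisionError, B raises ZeroDivisionError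
import Mathlib
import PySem

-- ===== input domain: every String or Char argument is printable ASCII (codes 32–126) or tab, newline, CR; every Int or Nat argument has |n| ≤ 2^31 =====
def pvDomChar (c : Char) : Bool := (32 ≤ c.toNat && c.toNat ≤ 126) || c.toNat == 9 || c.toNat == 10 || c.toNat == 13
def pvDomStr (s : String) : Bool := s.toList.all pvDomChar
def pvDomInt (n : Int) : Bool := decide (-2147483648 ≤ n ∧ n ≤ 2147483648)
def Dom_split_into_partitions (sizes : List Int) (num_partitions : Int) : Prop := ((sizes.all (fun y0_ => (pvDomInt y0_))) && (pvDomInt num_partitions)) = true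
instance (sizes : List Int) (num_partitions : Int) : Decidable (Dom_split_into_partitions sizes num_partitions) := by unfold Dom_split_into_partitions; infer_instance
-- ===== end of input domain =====

-- B replaces A's partition-at-a-time sweeps (with head/tail list rebuilding) by one
-- first-fit-decreasing pass over all elements with a running fill per bin (objective: alternative).

-- ===== PORT A =====
-- A's inner 'while len(head) > 0: elem = head.pop(); …' pops from the END of the ascending
-- head list; it is rendered as structural recursion over head.reverse (same pop order), with
-- result[partition] and tail accumulated by append in Python's append order; exact.
def aLoop (sizes : List Int) (psize : Int) : List Int → Int → List Int → List Int → (List Int × List Int)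
  | [], _cur, part, tl => (part, tl)
  | e :: rest, cur, part, tl =>
      let se := PySem.List.pyGetD sizes e 0   -- sizes[elem]; elem comes from range(len(sizes)), always in range
      if se ≤ psize - cur then aLoop sizes psize rest (cur + se) (part ++ [e]) tl
      else aLoop sizes psize rest cur part (tl ++ [e])

-- 'for partition in range(len(result))' with the 'head, tail = list(reversed(tail)), []' swap
def aOuter (sizes : List Int) (psize : Int) : Nat → List Int → List (List Int) → (List (List Int) × List Int)
  | 0, head, res => (res, head)
  | n + 1, head, res =>
      let pt := aLoop sizes psize head.reverse 0 [] []
      aOuter sizes psize n pt.2.reverse (res ++ [pt.1])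

def split_into_partitions (sizes : List Int) (num_partitions : Int) : List (List Int) :=
  let total_size := sizes.sum
  let partition_size := PySem.Int.floordiv (total_size + num_partitions - 1) num_partitions
  let perm := PySem.List.sorted (PySem.List.pyRange 0 (sizes.length : Int) 1)
      (fun k => PySem.List.pyGetD sizes k 0) false
  let rh := aOuter sizes partition_size (num_partitions - 1).toNat perm []
  rh.1 ++ [rh.2]

-- ===== PORT B =====
-- inner 'for p in range(k): … break / else: reject' over (fill, items) bins
def tryPlace (psize : Int) (se : Int) (e : Int) : List (Int × List Int) → Option (List (Int × List Int))
  | [] => none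
  | b :: rest =>
      if b.1 + se ≤ psize then some ((b.1 + se, b.2 ++ [e]) :: rest)
      else (tryPlace psize se e rest).map (b :: ·)

-- the single pass 'for e in order', rejects accumulated in encounter order
def ffd (sizes : List Int) (psize : Int) : List Int → List (Int × List Int) → List Int → (List (Int × List Int) × List Int)
  | [], bins, rej => (bins, rej)
  | e :: es, bins, rej =>
      let se := PySem.List.pyGetD sizes e 0
      match tryPlace psize se e bins with
      | some bins' => ffd sizes psize es bins' rej
      | none => ffd sizes psize es bins (rej ++ [e])

def split_into_partitions_alt (sizes : List Int) (num_partitions : Int) : List (List Int) :=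
  let total := sizes.sum
  let psize := PySem.Int.floordiv (total + num_partitions - 1) num_partitions
  let order := (PySem.List.sorted (PySem.List.pyRange 0 (sizes.length : Int) 1)
      (fun k => PySem.List.pyGetD sizes k 0) false).reverse
  let k := (num_partitions - 1).toNat
  let br := ffd sizes psize order (List.replicate k ((0 : Int), ([] : List Int))) []
  br.1.map Prod.snd ++ [br.2.reverse]

-- ===== PRECONDITION & SPEC =====
-- num_partitions = 0 makes '// num_partitions' raise ZeroDivisionError in A (and in B); nothing else raises.
def Pre_split_into_partitions (sizes : List Int) (num_partitions : Int) : Prop := num_partitions ≠ 0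
instance (sizes : List Int) (num_partitions : Int) : Decidable (Pre_split_into_partitions sizes num_partitions) := by unfold Pre_split_into_partitions; infer_instance
def pvWitness_split_into_partitions : List Int × Int := ([1, 2, 3, 1], 2)
def Spec_split_into_partitions (sizes : List Int) (num_partitions : Int) (out : List (List Int)) : Prop := out = split_into_partitions_alt sizes num_partitions
instance (sizes : List Int) (num_partitions : Int) (out : List (List Int)) : Decidable (Spec_split_into_partitions sizes num_partitions out) := by unfold Spec_split_into_partitions; infer_instance

-- ===== CLAIM (what is proved, stated in full; the proofs are below) =====
def Claim_equal_split_into_partitions : Prop := ∀ (sizes : List Int) (num_partitions : Int), Dom_split_into_partitions sizes num_partitions → Pre_split_into_partitions sizes num_partitions → Spec_split_into_partitions sizes num_partitions (split_into_partitions sizes num_partitions)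

-- ===== LEMMAS AND PROOFS =====

-- the tail accumulator of aLoop only ever grows by appending
lemma aLoop_tl (sizes : List Int) (psize : Int) :
    ∀ (ds : List Int) (c : Int) (part tl : List Int),
      aLoop sizes psize ds c part tl =
        ((aLoop sizes psize ds c part []).1, tl ++ (aLoop sizes psize ds c part []).2) := by
  intro ds
  induction ds with
  | nil => intro c part tl; simp [aLoop]
  | cons e es ih =>
      intro c part tl
      simp only [aLoop, List.nil_append]
      split_ifs with h
      · exact ih _ _ tl
      · rw [ih _ _ (tl ++ [e]), ih _ _ [e]]
        simp

-- with no bins left, every element is rejected in order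
lemma ffd_nil_bins (sizes : List Int) (psize : Int) :
    ∀ (ds rej : List Int), ffd sizes psize ds [] rej = ([], rej ++ ds) := by
  intro ds
  induction ds with
  | nil => intro rej; simp [ffd]
  | cons e es ih => intro rej; simp [ffd, tryPlace, ih]

-- peel the first bin off a first-fit pass: it collects exactly A's one-partition sweep,
-- and the rejected elements flow (in order) into the remaining bins
lemma ffd_peel (sizes : List Int) (psize : Int) :
    ∀ (ds : List Int) (c : Int) (acc : List Int) (bins : List (Int × List Int)) (rej : List Int),
      ((ffd sizes psize ds ((c, acc) :: bins) rej).1.map Prod.snd,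
       (ffd sizes psize ds ((c, acc) :: bins) rej).2) =
      ((aLoop sizes psize ds c acc []).1 ::
         (ffd sizes psize (aLoop sizes psize ds c acc []).2 bins rej).1.map Prod.snd,
       (ffd sizes psize (aLoop sizes psize ds c acc []).2 bins rej).2) := by
  intro ds
  induction ds with
  | nil => intro c acc bins rej; simp [ffd, aLoop]
  | cons e es ih =>
      intro c acc bins rej
      simp only [ffd, aLoop, tryPlace, List.nil_append]
      by_cases h : PySem.List.pyGetD sizes e 0 ≤ psize - c
      · rw [if_pos h, if_pos (by omega)]
        exact ih (c + PySem.List.pyGetD sizes e 0) (acc ++ [e]) bins rej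
      · rw [if_neg h, if_neg (by omega)]
        rw [aLoop_tl sizes psize es c acc [e]]
        cases htp : tryPlace psize (PySem.List.pyGetD sizes e 0) e bins with
        | some bins2 =>
            simp only [Option.map_some]
            rw [ih c acc bins2 rej]
            have : ffd sizes psize ([e] ++ (aLoop sizes psize es c acc []).2) bins rej
                = ffd sizes psize (aLoop sizes psize es c acc []).2 bins2 rej := by
              simp [ffd, htp]
            rw [← this]
        | none =>
            simp only [Option.map_none]
            rw [ih c acc bins (rej ++ [e])]
            have : ffd sizes psize ([e] ++ (aLoop sizes psize es c acc []).2) bins rej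
                = ffd sizes psize (aLoop sizes psize es c acc []).2 bins (rej ++ [e]) := by
              simp [ffd, htp]
            rw [← this]

-- n passes of A over an (ascending) head list = one first-fit pass over its reverse with n bins
lemma outer_eq (sizes : List Int) (psize : Int) :
    ∀ (n : Nat) (asc : List Int) (res : List (List Int)),
      (aOuter sizes psize n asc res).1 ++ [(aOuter sizes psize n asc res).2] =
        res ++ (ffd sizes psize asc.reverse (List.replicate n ((0 : Int), ([] : List Int))) []).1.map Prod.snd
            ++ [(ffd sizes psize asc.reverse (List.replicate n ((0 : Int), ([] : List Int))) []).2.reverse] := by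
  intro n
  induction n with
  | zero => intro asc res; simp [aOuter, ffd_nil_bins]
  | succ m ih =>
      intro asc res
      simp only [aOuter, List.replicate_succ]
      rw [ih]
      have hp := ffd_peel sizes psize asc.reverse 0 []
          (List.replicate m ((0 : Int), ([] : List Int))) []
      rw [Prod.mk.injEq] at hp
      rw [hp.1, hp.2]
      simp

-- ===== VERDICT (by name: the statement is the Claim_ definition above) =====
theorem split_into_partitions_spec : Claim_equal_split_into_partitions := by
  intro sizes num_partitions _hdom _hpre
  unfold Spec_split_into_partitions split_into_partitions split_into_partitions_alt
  simp only []
  rw [outer_eq]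
  simp
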